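-- pv_equiv track=rewrite | github.com/nathom/cse251b-final-project | rl/ai.py | large_on_edges
-- ===== SOURCE A (Python) =====
-- def large_on_edges(matrix):
--     n = len(matrix)
--     count = 0
--     # First and last rows
--     for i in range(n):
--         if matrix[0][i] >= 16:
--             count += 1
--         if matrix[0][i] >= 32:
--             count += 1
--         if matrix[0][i] >= 64:
--             count += 1
--         if matrix[0][i] >= 128:
--             count += 1
--         if matrix[n - 1][i] >= 16:
--             count += 1
--         if matrix[n - 1][i] >= 32:
--             count += 1
--         if matrix[n - 1][i] >= 64:
--             count += 1
--         if matrix[n - 1][i] >= 128: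
--             count += 1
--     # First and last columns (not double counting corners)
--     for i in range(1, n - 1):
--         if matrix[i][0] >= 16:
--             count += 1
--         if matrix[i][0] >= 32:
--             count += 1
--         if matrix[i][0] >= 64:
--             count += 1
--         if matrix[i][0] >= 128:
--             count += 1
--         if matrix[i][n - 1] >= 16:
--             count += 1
--         if matrix[i][n - 1] >= 32:
--             count += 1
--         if matrix[i][n - 1] >= 64:
--             count += 1
--         if matrix[i][n - 1] >= 128:
--             count += 1
--     return count
-- ===== SOURCE B (Python) =====
-- def _bisect_left(a, x):
--     lo, hi = 0, len(a)
--     while lo < hi: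
--         mid = (lo + hi) // 2
--         if a[mid] < x:
--             lo = mid + 1
--         else:
--             hi = mid
--     return lo
--
--
-- def large_on_edges(matrix):
--     n = len(matrix)
--     # gather the border values (row 0, row n-1 fully; interior rows: both end columns)
--     edge = [matrix[0][i] for i in range(n)] + [matrix[n - 1][i] for i in range(n)]
--     for i in range(1, n - 1):
--         edge.append(matrix[i][0])
--         edge.append(matrix[i][n - 1])
--     # sort once, then binary-search each threshold's insertion point:
--     # values >= t are exactly those after bisect_left(edge, t)
--     edge.sort()
--     total = 0
--     for t in (16, 32, 64, 128):
--         total += len(edge) - _bisect_left(edge, t)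
--     return total
-- ===== Notes on version B (the rewrite author's own statement) =====
-- stated objective: alternative
-- what changed: A counts threshold crossings with eight if-increments inside two index loops; B gathers the border values, sorts them once, and answers with four binary searches: for each threshold t it adds len(edge) - bisect_left(sorted_edge, t).
import Mathlib
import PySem

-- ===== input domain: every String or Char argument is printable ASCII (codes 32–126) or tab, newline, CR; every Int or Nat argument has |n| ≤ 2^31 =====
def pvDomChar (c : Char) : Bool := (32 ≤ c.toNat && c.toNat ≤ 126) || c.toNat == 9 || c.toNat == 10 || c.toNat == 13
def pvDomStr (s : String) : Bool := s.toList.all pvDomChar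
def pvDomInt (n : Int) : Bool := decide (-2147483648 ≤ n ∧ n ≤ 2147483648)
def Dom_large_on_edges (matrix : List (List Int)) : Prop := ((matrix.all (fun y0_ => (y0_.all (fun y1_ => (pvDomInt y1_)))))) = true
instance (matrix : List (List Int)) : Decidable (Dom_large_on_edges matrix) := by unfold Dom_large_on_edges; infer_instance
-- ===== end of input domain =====

-- B replaces A's per-cell threshold counters with sort-then-binary-search over the border values.

-- ===== PORT A =====
-- literal transliteration of A: two index loops, eight if-counters per step
def large_on_edges (matrix : List (List Int)) : Int :=
  let n := matrix.length
  let count : Int := (List.range n).foldl (fun count i =>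
    count
    + (if 16 ≤ (matrix.getD 0 []).getD i 0 then 1 else 0)
    + (if 32 ≤ (matrix.getD 0 []).getD i 0 then 1 else 0)
    + (if 64 ≤ (matrix.getD 0 []).getD i 0 then 1 else 0)
    + (if 128 ≤ (matrix.getD 0 []).getD i 0 then 1 else 0)
    + (if 16 ≤ (matrix.getD (n - 1) []).getD i 0 then 1 else 0)
    + (if 32 ≤ (matrix.getD (n - 1) []).getD i 0 then 1 else 0)
    + (if 64 ≤ (matrix.getD (n - 1) []).getD i 0 then 1 else 0)
    + (if 128 ≤ (matrix.getD (n - 1) []).getD i 0 then 1 else 0)) 0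
  (List.range' 1 (n - 1 - 1)).foldl (fun count i =>
    count
    + (if 16 ≤ (matrix.getD i []).getD 0 0 then 1 else 0)
    + (if 32 ≤ (matrix.getD i []).getD 0 0 then 1 else 0)
    + (if 64 ≤ (matrix.getD i []).getD 0 0 then 1 else 0)
    + (if 128 ≤ (matrix.getD i []).getD 0 0 then 1 else 0)
    + (if 16 ≤ (matrix.getD i []).getD (n - 1) 0 then 1 else 0)
    + (if 32 ≤ (matrix.getD i []).getD (n - 1) 0 then 1 else 0)
    + (if 64 ≤ (matrix.getD i []).getD (n - 1) 0 then 1 else 0)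
    + (if 128 ≤ (matrix.getD i []).getD (n - 1) 0 then 1 else 0)) count

-- ===== PORT B =====
-- transliteration of Source B: gather the border values, sort once, then for each of the four
-- thresholds t add len(edge) - bisect_left(sorted_edge, t).  Source B's hand-written _bisect_left
-- is the textbook loop, which is exactly PySem.List.bisectLeft's loop.
def large_on_edges_alt (matrix : List (List Int)) : Int :=
  let n := matrix.length
  let edge : List Int :=
    (List.range n).map (fun i => (matrix.getD 0 []).getD i 0)
    ++ (List.range n).map (fun i => (matrix.getD (n - 1) []).getD i 0)
    ++ (List.range' 1 (n - 1 - 1)).flatMap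
         (fun i => [(matrix.getD i []).getD 0 0, (matrix.getD i []).getD (n - 1) 0])
  let s := PySem.List.sorted edge (fun v => v) false
  ([16, 32, 64, 128] : List Int).foldl
    (fun total t => total + ((s.length : Int) - (PySem.List.bisectLeft s t : Int))) 0

-- ===== PRECONDITION & SPEC =====
-- Pre_: every row at least as long as the matrix; exactly the inputs on which A's
-- index accesses (columns up to n-1 of the accessed rows) do not raise IndexError.
def Pre_large_on_edges (matrix : List (List Int)) : Prop :=
  ∀ r ∈ matrix, matrix.length ≤ r.length
instance (matrix : List (List Int)) : Decidable (Pre_large_on_edges matrix) := by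
  unfold Pre_large_on_edges; infer_instance

def pvWitness_large_on_edges : List (List Int) := [[16, 32], [64, 128]]

def Spec_large_on_edges (matrix : List (List Int)) (out : Int) : Prop := out = large_on_edges_alt matrix
instance (matrix : List (List Int)) (out : Int) : Decidable (Spec_large_on_edges matrix out) := by unfold Spec_large_on_edges; infer_instance

-- ===== CLAIM (what is proved, stated in full; the proofs are below) =====
def Claim_equal_large_on_edges : Prop := ∀ (matrix : List (List Int)), Dom_large_on_edges matrix → Pre_large_on_edges matrix → Spec_large_on_edges matrix (large_on_edges matrix)

-- ===== LEMMAS AND PROOFS =====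

-- number of thresholds a value reaches
def pvThrCount (v : Int) : Int :=
  (if 16 ≤ v then (1:Int) else 0) + (if 32 ≤ v then 1 else 0)
  + (if 64 ≤ v then 1 else 0) + (if 128 ≤ v then 1 else 0)

theorem pv_eight_ifs (a b : Int) :
    (if 16 ≤ a then (1:Int) else 0) + (if 32 ≤ a then 1 else 0)
    + (if 64 ≤ a then 1 else 0) + (if 128 ≤ a then 1 else 0)
    + (if 16 ≤ b then 1 else 0) + (if 32 ≤ b then 1 else 0)
    + (if 64 ≤ b then 1 else 0) + (if 128 ≤ b then 1 else 0)
    = pvThrCount a + pvThrCount b := by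
  unfold pvThrCount; ring

theorem pv_foldl_two {α : Type} (g h : α → Int) (r : List α) (c : Int) :
    r.foldl (fun c i => c + g i + h i) c = c + (r.map (fun i => g i + h i)).sum := by
  induction r generalizing c with
  | nil => simp
  | cons x xs ih => simp [ih]; ring

theorem pv_sum_map_add {α : Type} (g h : α → Int) (r : List α) :
    (r.map (fun i => g i + h i)).sum = (r.map g).sum + (r.map h).sum := by
  induction r with
  | nil => simp
  | cons x xs ih => simp [ih]; ring

theorem pv_pairs_sum (g h : Nat → Int) (r : List Nat) :
    ((r.flatMap (fun i => [g i, h i])).map pvThrCount).sum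
      = (r.map (fun i => pvThrCount (g i) + pvThrCount (h i))).sum := by
  induction r with
  | nil => simp
  | cons x xs ih => simp [ih]; ring

-- on a sorted list, bisect_left returns the number of elements below the probe
theorem pv_bisect_count (s : List Int) (t : Int) (hs : s.Pairwise (· ≤ ·)) :
    PySem.List.bisectLeft s t = s.countP (fun v => decide (v < t)) := by
  obtain ⟨hle, hlt, hge⟩ := PySem.List.bisectLeft_spec s t hs
  set b := PySem.List.bisectLeft s t with hb
  have h1 : (s.take b).countP (fun v => decide (v < t)) = (s.take b).length := by
    apply List.countP_eq_length.mpr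
    intro a ha
    obtain ⟨j, hj, rfl⟩ := List.mem_iff_getElem.mp ha
    have hjb : j < b := lt_of_lt_of_le hj (by simp [List.length_take])
    have hjl : j < s.length := lt_of_lt_of_le hjb hle
    have := hlt j hjl hjb
    simp [List.getElem_take]; omega
  have h2 : (s.drop b).countP (fun v => decide (v < t)) = 0 := by
    apply List.countP_eq_zero.mpr
    intro a ha
    obtain ⟨j, hj, rfl⟩ := List.mem_iff_getElem.mp ha
    have hjl : b + j < s.length := by
      have := hj; simp [List.length_drop] at this; omega
    have := hge (b + j) hjl (Nat.le_add_right _ _)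
    simp [List.getElem_drop]
    omega
  have : s.countP (fun v => decide (v < t))
      = (s.take b).countP (fun v => decide (v < t)) + (s.drop b).countP (fun v => decide (v < t)) := by
    rw [← List.countP_append, List.take_append_drop]
  rw [this, h1, h2, List.length_take]
  omega

-- hence len - bisect_left counts the elements at or above the probe
theorem pv_len_sub_bisect (s : List Int) (t : Int) (hs : s.Pairwise (· ≤ ·)) :
    (s.length : Int) - (PySem.List.bisectLeft s t : Int)
      = (s.countP (fun v => decide (t ≤ v)) : Int) := by
  have h := pv_bisect_count s t hs
  have hsplit : s.countP (fun v => decide (v < t)) + s.countP (fun v => decide (t ≤ v)) = s.length := by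
    have := List.length_eq_countP_add_countP (l := s) (p := fun v => decide (v < t))
    have hc : s.countP (fun a => decide ¬decide (a < t) = true) = s.countP (fun v => decide (t ≤ v)) := by
      apply List.countP_congr
      intro a _
      by_cases hca : a < t <;> simp [hca] <;> try omega
    omega
  omega

-- the four per-threshold counts, summed, equal the per-value threshold counts, summed
theorem pv_four_counts (l : List Int) :
    ((l.countP (fun v => decide ((16:Int) ≤ v)) : Int)
     + (l.countP (fun v => decide ((32:Int) ≤ v)) : Int)
     + (l.countP (fun v => decide ((64:Int) ≤ v)) : Int)
     + (l.countP (fun v => decide ((128:Int) ≤ v)) : Int))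
      = (l.map pvThrCount).sum := by
  induction l with
  | nil => simp
  | cons x xs ih =>
    simp only [List.countP_cons, List.map_cons, List.sum_cons, pvThrCount]
    push_cast
    by_cases h1 : (16:Int) ≤ x <;> by_cases h2 : (32:Int) ≤ x <;>
      by_cases h3 : (64:Int) ≤ x <;> by_cases h4 : (128:Int) ≤ x <;>
      simp [h1, h2, h3, h4] <;> omega

-- ===== VERDICT (by name: the statement is the Claim_ definition above) =====
theorem large_on_edges_spec : Claim_equal_large_on_edges := by
  intro matrix _ _
  unfold Spec_large_on_edges
  simp only [large_on_edges, large_on_edges_alt]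
  set n := matrix.length with hn
  set top : Nat → Int := fun i => (matrix.getD 0 []).getD i 0 with htop
  set bot : Nat → Int := fun i => (matrix.getD (n - 1) []).getD i 0 with hbot
  set lef : Nat → Int := fun i => (matrix.getD i []).getD 0 0 with hlef
  set rig : Nat → Int := fun i => (matrix.getD i []).getD (n - 1) 0 with hrig
  set edge : List Int :=
    (List.range n).map top ++ (List.range n).map bot
    ++ (List.range' 1 (n - 1 - 1)).flatMap (fun i => [lef i, rig i]) with hedge
  set s := PySem.List.sorted edge (fun v => v) false with hs
  have hpair : s.Pairwise (· ≤ ·) := PySem.List.sorted_pairwise edge (fun v => v)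
  have hperm : s.Perm edge := PySem.List.sorted_perm edge (fun v => v) false
  -- B's side: expand the four-threshold fold and turn it into counts over edge
  have hB : ([16, 32, 64, 128] : List Int).foldl
      (fun total t => total + ((s.length : Int) - (PySem.List.bisectLeft s t : Int))) 0
      = (edge.map pvThrCount).sum := by
    simp only [List.foldl_cons, List.foldl_nil, zero_add]
    rw [pv_len_sub_bisect s 16 hpair, pv_len_sub_bisect s 32 hpair,
        pv_len_sub_bisect s 64 hpair, pv_len_sub_bisect s 128 hpair,
        hperm.countP_eq, hperm.countP_eq, hperm.countP_eq, hperm.countP_eq,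
        pv_four_counts]
  rw [hB]
  -- A's side: fold the eight counters into pvThrCount sums over the same edge list
  have e1 : (fun (count : Int) (i : Nat) =>
      count
      + (if 16 ≤ top i then (1:Int) else 0) + (if 32 ≤ top i then 1 else 0)
      + (if 64 ≤ top i then 1 else 0) + (if 128 ≤ top i then 1 else 0)
      + (if 16 ≤ bot i then 1 else 0) + (if 32 ≤ bot i then 1 else 0)
      + (if 64 ≤ bot i then 1 else 0) + (if 128 ≤ bot i then 1 else 0))
    = (fun (count : Int) (i : Nat) => count + pvThrCount (top i) + pvThrCount (bot i)) := by
    funext c i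
    have := pv_eight_ifs (top i) (bot i)
    omega
  have e2 : (fun (count : Int) (i : Nat) =>
      count
      + (if 16 ≤ lef i then (1:Int) else 0) + (if 32 ≤ lef i then 1 else 0)
      + (if 64 ≤ lef i then 1 else 0) + (if 128 ≤ lef i then 1 else 0)
      + (if 16 ≤ rig i then 1 else 0) + (if 32 ≤ rig i then 1 else 0)
      + (if 64 ≤ rig i then 1 else 0) + (if 128 ≤ rig i then 1 else 0))
    = (fun (count : Int) (i : Nat) => count + pvThrCount (lef i) + pvThrCount (rig i)) := by
    funext c i
    have := pv_eight_ifs (lef i) (rig i)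
    omega
  rw [e1, e2, pv_foldl_two, pv_foldl_two, zero_add, pv_sum_map_add, pv_sum_map_add]
  rw [hedge]
  simp only [List.map_append, List.sum_append, List.map_map]
  rw [pv_pairs_sum, pv_sum_map_add]
  simp only [Function.comp_def]
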